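-- pv_equiv track=rewrite | github.com/solder-99/every_assignment | src/knapsack.py | _compare_id_lists
-- ===== SOURCE A (Python) =====
-- from typing import List, Tuple, Optional
--
-- def _compare_id_lists(list_a: List[str], list_b: List[str]) -> int:
--     """
--     IDリストの辞書順比較（Pythonのlist比較準拠）
--
--     Returns:
--         list_a < list_b なら負、list_a == list_b なら0、list_a > list_b なら正
--     """
--     min_len = min(len(list_a), len(list_b))
--     for i in range(min_len):
--         if list_a[i] < list_b[i]:
--             return -1
--         elif list_a[i] > list_b[i]:
--             return 1
--
--     # 先頭が同じ場合、短い方が小さい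
--     if len(list_a) < len(list_b):
--         return -1
--     elif len(list_a) > len(list_b):
--         return 1
--     return 0
-- ===== SOURCE B (Python) =====
-- def _compare_id_lists(list_a, list_b):
--     """Flatten each list into one NUL-delimited string; since NUL sorts below every
--     ID character, ordinary string order on the encodings equals the list order
--     (including the shorter-prefix-is-smaller tie-break)."""
--     enc_a = "".join(s + "\0" for s in list_a)
--     enc_b = "".join(s + "\0" for s in list_b)
--     if enc_a < enc_b:
--         return -1
--     if enc_b < enc_a:
--         return 1
--     return 0
-- ===== Notes on version B (the rewrite author's own statement) =====
-- stated objective: alternative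
-- what changed: Replaces the element-wise scan with length tie-break by a reduction: each list is flattened into a single NUL-delimited string and the two flat strings are compared once; NUL sorts below every ID character of the stated ASCII domain, so the flat comparison reproduces the list order exactly.
import Mathlib
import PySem

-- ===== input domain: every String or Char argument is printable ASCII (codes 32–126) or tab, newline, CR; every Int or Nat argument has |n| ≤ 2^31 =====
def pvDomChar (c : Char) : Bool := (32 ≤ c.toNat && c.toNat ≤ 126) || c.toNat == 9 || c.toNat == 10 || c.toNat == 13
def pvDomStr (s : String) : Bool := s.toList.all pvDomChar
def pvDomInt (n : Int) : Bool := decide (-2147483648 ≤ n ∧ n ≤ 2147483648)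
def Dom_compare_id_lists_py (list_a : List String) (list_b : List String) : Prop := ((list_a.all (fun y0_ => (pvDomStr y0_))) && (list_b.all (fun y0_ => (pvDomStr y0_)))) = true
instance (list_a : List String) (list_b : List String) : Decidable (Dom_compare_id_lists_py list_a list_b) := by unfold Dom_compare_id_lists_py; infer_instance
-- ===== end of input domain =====

-- B reduces the list comparison to one flat string comparison: each list is flattened
-- into a single NUL-delimited character sequence (NUL sorts below every ID character of
-- the stated ASCII domain), so comparing the two encodings once reproduces A's -1/0/1.


-- ===== PORT A =====
-- A's loop over range(min_len): recursion over both lists in step; when either list is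
-- exhausted the length-comparison tail runs.  Python's str '<' is code-point
-- lexicographic = Lean's '<' on List Char, so elements are compared via .toList.
def compareIdLoop : List String → List String → Int
  | a :: as, b :: bs =>
    if a.toList < b.toList then -1
    else if b.toList < a.toList then 1
    else compareIdLoop as bs
  | as, bs =>
    if as.length < bs.length then -1
    else if bs.length < as.length then 1
    else 0

def compare_id_lists_py (list_a : List String) (list_b : List String) : Int :=
  compareIdLoop list_a list_b

-- ===== PORT B =====
-- "".join(s + "\0" for s in xs): flatten with a NUL sentinel after each element.
def pvSentinel : Char := Char.ofNat 0

def encodeIds (xs : List String) : List Char :=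
  xs.flatMap (fun s => s.toList ++ [pvSentinel])

def compare_id_lists_py_alt (list_a : List String) (list_b : List String) : Int :=
  let enc_a := encodeIds list_a
  let enc_b := encodeIds list_b
  if enc_a < enc_b then -1
  else if enc_b < enc_a then 1
  else 0

-- ===== PRECONDITION & SPEC =====
def Spec_compare_id_lists_py (list_a : List String) (list_b : List String) (out : Int) : Prop := out = compare_id_lists_py_alt list_a list_b
instance (list_a : List String) (list_b : List String) (out : Int) : Decidable (Spec_compare_id_lists_py list_a list_b out) := by unfold Spec_compare_id_lists_py; infer_instance

-- ===== CLAIM (what is proved, stated in full; the proofs are below) =====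
def Claim_equal_compare_id_lists_py : Prop := ∀ (list_a : List String) (list_b : List String), Dom_compare_id_lists_py list_a list_b → Spec_compare_id_lists_py list_a list_b (compare_id_lists_py list_a list_b)

-- ===== LEMMAS AND PROOFS =====

theorem domChar_pos {c : Char} (h : pvDomChar c = true) : 0 < c.toNat := by
  simp [pvDomChar] at h
  omega

theorem sentinel_lt {c : Char} (h : 0 < c.toNat) : pvSentinel < c := by
  have : pvSentinel.toNat = 0 := by decide
  have hlt : pvSentinel.toNat < c.toNat := by omega
  exact Char.lt_def.mpr (by exact_mod_cast hlt)

theorem encodeIds_cons (s : String) (xs : List String) :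
    encodeIds (s :: xs) = s.toList ++ pvSentinel :: encodeIds xs := by
  simp [encodeIds]

-- equal prefix cancels in the lexicographic order
theorem append_sent_lt_iff (a ra rb : List Char) :
    (a ++ pvSentinel :: ra < a ++ pvSentinel :: rb) ↔ ra < rb := by
  induction a with
  | nil => simp
  | cons x xs ih => simp [ih]

-- a < b (b's characters all nonzero) transfers to the sentinel encodings
theorem encode_lt (a b : List Char) (hb : ∀ c ∈ b, 0 < c.toNat)
    (h : a < b) (ra rb : List Char) :
    a ++ pvSentinel :: ra < b ++ pvSentinel :: rb := by
  induction a generalizing b with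
  | nil =>
    cases b with
    | nil => exact absurd h (List.not_lt_nil _)
    | cons c bs =>
      simp only [List.nil_append, List.cons_append]
      exact List.cons_lt_cons_iff.mpr
        (Or.inl (sentinel_lt (hb c (List.mem_cons_self))))
  | cons x xs ih =>
    cases b with
    | nil => exact absurd h (List.not_lt_nil _)
    | cons y bs =>
      rcases List.cons_lt_cons_iff.mp h with hxy | ⟨hxy, hrest⟩
      · simp only [List.cons_append]
        exact List.cons_lt_cons_iff.mpr (Or.inl hxy)
      · subst hxy
        simp only [List.cons_append]
        exact List.cons_lt_cons_iff.mpr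
          (Or.inr ⟨rfl, ih bs (fun c hc => hb c (List.mem_cons_of_mem _ hc)) hrest⟩)

theorem nil_lt_append_cons (a : List Char) (c : Char) (r : List Char) :
    ([] : List Char) < a ++ c :: r := by
  cases a with
  | nil => exact List.nil_lt_cons _ _
  | cons x xs => exact List.nil_lt_cons _ _

theorem loop_eq (la lb : List String)
    (ha : ∀ s ∈ la, ∀ c ∈ s.toList, 0 < c.toNat)
    (hb : ∀ s ∈ lb, ∀ c ∈ s.toList, 0 < c.toNat) :
    compareIdLoop la lb = compare_id_lists_py_alt la lb := by
  induction la generalizing lb with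
  | nil =>
    cases lb with
    | nil => simp [compareIdLoop, compare_id_lists_py_alt, encodeIds]
    | cons b bs =>
      simp [compareIdLoop, compare_id_lists_py_alt, encodeIds, nil_lt_append_cons]
  | cons a as ih =>
    cases lb with
    | nil =>
      simp [compareIdLoop, compare_id_lists_py_alt, encodeIds, nil_lt_append_cons,
        List.not_lt_nil]
    | cons b bs =>
      have hac : ∀ c ∈ a.toList, 0 < c.toNat := ha a (List.mem_cons_self)
      have hbc : ∀ c ∈ b.toList, 0 < c.toNat := hb b (List.mem_cons_self)
      rcases lt_trichotomy a.toList b.toList with h | h | h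
      · have hlt : encodeIds (a :: as) < encodeIds (b :: bs) := by
          rw [encodeIds_cons, encodeIds_cons]
          exact encode_lt _ _ hbc h _ _
        have hnot : ¬ encodeIds (b :: bs) < encodeIds (a :: as) := asymm hlt
        simp [compareIdLoop, compare_id_lists_py_alt, h, hlt]
      · have h1 : (encodeIds (a :: as) < encodeIds (b :: bs)) ↔ encodeIds as < encodeIds bs := by
          rw [encodeIds_cons, encodeIds_cons, h, append_sent_lt_iff]
        have h2 : (encodeIds (b :: bs) < encodeIds (a :: as)) ↔ encodeIds bs < encodeIds as := by
          rw [encodeIds_cons, encodeIds_cons, h, append_sent_lt_iff]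
        have ihr := ih bs (fun s hs => ha s (List.mem_cons_of_mem _ hs))
          (fun s hs => hb s (List.mem_cons_of_mem _ hs))
        simp only [compareIdLoop, compare_id_lists_py_alt] at ihr ⊢
        simp [h, h1, h2, ihr]
      · have hlt : encodeIds (b :: bs) < encodeIds (a :: as) := by
          rw [encodeIds_cons, encodeIds_cons]
          exact encode_lt _ _ hac h _ _
        have hnot : ¬ encodeIds (a :: as) < encodeIds (b :: bs) := asymm hlt
        simp [compareIdLoop, compare_id_lists_py_alt, h, hlt, hnot, le_of_lt h]

-- ===== VERDICT (by name: the statement is the Claim_ definition above) =====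
theorem compare_id_lists_py_spec : Claim_equal_compare_id_lists_py := by
  intro la lb hdom
  unfold Dom_compare_id_lists_py at hdom
  simp only [Bool.and_eq_true, List.all_eq_true] at hdom
  have ha : ∀ s ∈ la, ∀ c ∈ s.toList, 0 < c.toNat := by
    intro s hs c hc
    have := hdom.1 s hs
    simp only [pvDomStr, List.all_eq_true] at this
    exact domChar_pos (this c hc)
  have hb : ∀ s ∈ lb, ∀ c ∈ s.toList, 0 < c.toNat := by
    intro s hs c hc
    have := hdom.2 s hs
    simp only [pvDomStr, List.all_eq_true] at this
    exact domChar_pos (this c hc)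
  unfold Spec_compare_id_lists_py compare_id_lists_py
  exact loop_eq la lb ha hb
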